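-- pv_equiv track=rewrite | github.com/taurusjun/XiaohongshuSkills | scripts/bn/cryptonews_publish.py | build_post_content
-- ===== SOURCE A (Python) =====
-- def build_post_content(title: str, summary: str, bullets: list[str], markdown: bool = False) -> str:
--     """
--     组装发布正文。
--     markdown=True 时要点用 `- ` 前缀（文章模式 ProseMirror 自动转 bullet list）
--     markdown=False 时用 `• ` 普通字符（普通帖子模式）
--     """
--     bullet_prefix = "- " if markdown else "• "
--     parts = []
--
--     if markdown:
--         # 文章模式：正文不含标题，摘要直接接 bullet（ProseMirror 自带段落间距）
--         if summary:
--             parts.append(summary)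
--         for bullet in bullets:
--             parts.append(f"{bullet_prefix}{bullet}")
--     else:
--         # 普通帖子模式：每段空行分隔
--         parts.append(title)
--         parts.append("")
--         if summary:
--             parts.append(summary)
--             parts.append("")
--         for bullet in bullets:
--             parts.append(f"{bullet_prefix}{bullet}")
--             parts.append("")
--         while parts and parts[-1] == "":
--             parts.pop()
--
--     return "\n".join(parts)
-- ===== SOURCE B (Python) =====
-- def build_post_content(title: str, summary: str, bullets: list[str], markdown: bool = False) -> str:
--     """Assemble the post body with a streaming emitter: each block is written
--     through emit(), which outputs an explicit separator token before every block
--     except the first. No empty-string sentinel parts, no trailing trim loop,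
--     no sep.join over a block list."""
--     sep = "\n" if markdown else "\n\n"
--     prefix = "- " if markdown else "• "
--     out = []
--     first = True
--
--     def emit(block: str) -> None:
--         nonlocal first
--         if not first:
--             out.append(sep)
--         out.append(block)
--         first = False
--
--     if not markdown:
--         emit(title)
--     if summary:
--         emit(summary)
--     for b in bullets:
--         emit(prefix + b)
--     return "".join(out)
-- ===== Notes on version B (the rewrite author's own statement) =====
-- stated objective: alternative
-- what changed: B assembles the text with a streaming emitter (a first-block flag that writes an explicit separator token before every block except the first into a flat token stream, concatenated once), instead of A's parts list interleaved with empty-string sentinels, trailing while/pop trim loop and '\n'.join.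
import Mathlib
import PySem

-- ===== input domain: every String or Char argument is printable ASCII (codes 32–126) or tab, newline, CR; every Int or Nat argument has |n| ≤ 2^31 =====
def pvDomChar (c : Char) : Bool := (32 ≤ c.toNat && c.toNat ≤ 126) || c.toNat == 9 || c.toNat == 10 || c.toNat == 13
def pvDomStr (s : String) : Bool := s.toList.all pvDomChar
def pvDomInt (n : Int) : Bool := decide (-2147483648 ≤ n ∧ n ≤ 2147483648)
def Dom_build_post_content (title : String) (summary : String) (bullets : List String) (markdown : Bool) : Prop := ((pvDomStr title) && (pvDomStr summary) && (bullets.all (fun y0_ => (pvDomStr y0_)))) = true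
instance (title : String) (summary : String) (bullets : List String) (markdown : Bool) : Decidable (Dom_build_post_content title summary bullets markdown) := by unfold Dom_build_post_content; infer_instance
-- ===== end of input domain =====

-- B replaces A's parts list + ""-sentinels + trailing-pop loop + '\n'.join by a streaming
-- emitter: a first-block flag writes an explicit separator token before every block except
-- the first into a flat token stream, concatenated once; objective: alternative.

-- ===== PORT A =====
-- the `while parts and parts[-1] == "": parts.pop()` loop: structurally, it removes
-- the maximal trailing run of "" from the list
def pvPopTrailingEmpty : List String → List String
  | [] => []
  | x :: xs =>
    let ys := pvPopTrailingEmpty xs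
    if ys.isEmpty then (if x == "" then [] else [x]) else x :: ys

def build_post_content (title : String) (summary : String) (bullets : List String) (markdown : Bool) : String :=
  let bullet_prefix : String := if markdown then "- " else "• "
  let parts : List String := []
  if markdown then
    let parts := if summary ≠ "" then parts ++ [summary] else parts
    let parts := bullets.foldl (fun ps b => ps ++ [bullet_prefix ++ b]) parts
    PySem.Str.join "\n" parts
  else
    let parts := parts ++ [title]
    let parts := parts ++ [""]
    let parts := if summary ≠ "" then parts ++ [summary] ++ [""] else parts
    let parts := bullets.foldl (fun ps b => ps ++ [bullet_prefix ++ b] ++ [""]) parts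
    let parts := pvPopTrailingEmpty parts
    PySem.Str.join "\n" parts

-- ===== PORT B =====
-- Source B's `emit(block)`: state = (out tokens, first flag); a separator token is emitted
-- before every block except the first
def pvEmit (sep : String) (st : List String × Bool) (block : String) : List String × Bool :=
  ((if st.2 then st.1 else st.1 ++ [sep]) ++ [block], false)

def build_post_content_alt (title : String) (summary : String) (bullets : List String) (markdown : Bool) : String :=
  let sep : String := if markdown then "\n" else "\n\n"
  let pfx : String := if markdown then "- " else "• "
  let st : List String × Bool := ([], true)
  let st := if !markdown then pvEmit sep st title else st
  let st := if summary ≠ "" then pvEmit sep st summary else st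
  let st := bullets.foldl (fun s b => pvEmit sep s (pfx ++ b)) st
  PySem.Str.join "" st.1

-- ===== PRECONDITION & SPEC =====
def Spec_build_post_content (title : String) (summary : String) (bullets : List String) (markdown : Bool) (out : String) : Prop := out = build_post_content_alt title summary bullets markdown
instance (title : String) (summary : String) (bullets : List String) (markdown : Bool) (out : String) : Decidable (Spec_build_post_content title summary bullets markdown out) := by unfold Spec_build_post_content; infer_instance

-- ===== CLAIM (what is proved, stated in full; the proofs are below) =====
def Claim_equal_build_post_content : Prop := ∀ (title : String) (summary : String) (bullets : List String) (markdown : Bool), Dom_build_post_content title summary bullets markdown → Spec_build_post_content title summary bullets markdown (build_post_content title summary bullets markdown)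

-- ===== LEMMAS AND PROOFS =====

-- join as "first block ++ (sep ++ block) chunks", at the character level
theorem pv_chars_join_cons (sep : List Char) (x : List Char) (l : List (List Char)) :
    PySem.Chars.join sep (x :: l) = x ++ l.flatMap (fun s => sep ++ s) := by
  induction l generalizing x with
  | nil => simp [PySem.Chars.join_singleton]
  | cons y r ih => simp [PySem.Chars.join_cons_cons, ih y, List.append_assoc]

-- the bullet loop over emit: each bullet contributes a [sep, prefixed bullet] token pair
theorem pv_foldl_emit (sep pfx : String) (bullets : List String) (o : List String) :
    bullets.foldl (fun st b => pvEmit sep st (pfx ++ b)) (o, false)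
      = (o ++ bullets.flatMap (fun b => [sep, pfx ++ b]), false) := by
  induction bullets generalizing o with
  | nil => simp
  | cons b bs ih =>
    rw [List.foldl_cons, show pvEmit sep (o, false) (pfx ++ b) = (o ++ [sep, pfx ++ b], false) by
      simp [pvEmit], ih]
    simp

-- the characters of the [sep, block] token pairs
theorem pv_tokens_flatten (sep : String) (r : List String) :
    (r.flatMap (fun y => [sep, y])).flatMap String.toList
      = r.flatMap (fun s => sep.toList ++ s.toList) := by
  induction r with
  | nil => rfl
  | cons y t ih => simp [ih]

-- concatenating the token stream "x then [sep, y] pairs" is join sep (x :: l)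
theorem pv_chunks_join (sep x : String) (l : List String) :
    PySem.Str.join "" ([x] ++ l.flatMap (fun y => [sep, y])) = PySem.Str.join sep (x :: l) := by
  apply String.toList_inj.mp
  simp only [PySem.Str.toList_join, List.map_cons, List.singleton_append]
  rw [pv_chars_join_cons, pv_chars_join_cons]
  have h0 : ("" : String).toList = [] := rfl
  simp only [h0, List.flatMap_map, List.nil_append]
  exact congrArg (x.toList ++ ·) (pv_tokens_flatten sep l)

-- the blocks list interspersed with "" separators (what A's parts list trims to)
def pvSpaced : List String → List String
  | [] => []
  | [x] => [x]
  | x :: y :: r => x :: "" :: pvSpaced (y :: r)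

theorem pvSpaced_ne_nil (x : String) (l : List String) : pvSpaced (x :: l) ≠ [] := by
  cases l <;> simp [pvSpaced]

theorem pvPop_cons (x : String) (xs : List String) :
    pvPopTrailingEmpty (x :: xs)
      = if (pvPopTrailingEmpty xs).isEmpty then (if x == "" then [] else [x])
        else x :: pvPopTrailingEmpty xs := rfl

-- joining with "\n" across the ""-spaced list is joining the blocks with "\n\n"
theorem pv_join_spaced (l : List String) :
    PySem.Str.join "\n" (pvSpaced l) = PySem.Str.join "\n\n" l := by
  induction l with
  | nil => rfl
  | cons x rest ih =>
    cases rest with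
    | nil => rfl
    | cons y r =>
      apply String.toList_inj.mp
      have ih' := congrArg String.toList ih
      simp only [PySem.Str.toList_join] at ih' ⊢
      cases hr : pvSpaced (y :: r) with
      | nil => exact absurd hr (pvSpaced_ne_nil y r)
      | cons z zs =>
        rw [hr] at ih'
        simp only [pvSpaced, hr, List.map_cons] at ih' ⊢
        simp only [PySem.Chars.join_cons_cons]
        rw [ih']
        have hsep : ("\n\n" : String).toList = ("\n" : String).toList ++ ("\n" : String).toList := rfl
        have hnil : ("" : String).toList = [] := rfl
        simp [hsep, hnil, List.append_assoc]

-- trimming the sentinel-built list of nonempty blocks yields the spaced list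
theorem pv_trim_flatMap (l : List String) (h : ∀ x ∈ l, x ≠ "") (hl : l ≠ []) :
    pvPopTrailingEmpty (l.flatMap (fun x => [x, ""])) = pvSpaced l := by
  induction l with
  | nil => exact absurd rfl hl
  | cons x rest ih =>
    cases rest with
    | nil =>
      have hx : (x == "") = false := by simp [h x (by simp)]
      simp [pvPopTrailingEmpty, pvSpaced, hx]
    | cons y r =>
      have hy : pvPopTrailingEmpty ((y :: r).flatMap (fun x => [x, ""])) = pvSpaced (y :: r) :=
        ih (fun z hz => h z (by simp [hz])) (by simp)
      have hflat : (x :: y :: r).flatMap (fun x => [x, ""])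
          = x :: "" :: (y :: r).flatMap (fun x => [x, ""]) := by simp
      have hne : (pvSpaced (y :: r)).isEmpty = false := by
        simp [pvSpaced_ne_nil]
      rw [hflat, pvPop_cons, pvPop_cons, hy]
      simp [hne, pvSpaced]

-- A's trimmed sentinel list joined with "\n" = blocks joined with "\n\n" (title may be "")
theorem pv_main (t : String) (l : List String) (h : ∀ x ∈ l, x ≠ "") :
    PySem.Str.join "\n" (pvPopTrailingEmpty ((t :: l).flatMap (fun x => [x, ""])))
      = PySem.Str.join "\n\n" (t :: l) := by
  cases l with
  | nil =>
    by_cases ht : t = ""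
    · subst ht
      apply String.toList_inj.mp
      simp [pvPopTrailingEmpty, PySem.Str.toList_join, PySem.Chars.join_nil,
        PySem.Chars.join_singleton]
    · have ht' : (t == "") = false := by simp [ht]
      apply String.toList_inj.mp
      simp [pvPopTrailingEmpty, ht', PySem.Str.toList_join, PySem.Chars.join_singleton]
  | cons z zs =>
    have h1 : pvPopTrailingEmpty ((z :: zs).flatMap (fun x => [x, ""])) = pvSpaced (z :: zs) :=
      pv_trim_flatMap _ h (by simp)
    have hflat : (t :: z :: zs).flatMap (fun x => [x, ""])
        = t :: "" :: (z :: zs).flatMap (fun x => [x, ""]) := by simp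
    have hne : (pvSpaced (z :: zs)).isEmpty = false := by
      simp [pvSpaced_ne_nil]
    have h2 : pvPopTrailingEmpty ((t :: z :: zs).flatMap (fun x => [x, ""]))
        = pvSpaced (t :: z :: zs) := by
      rw [hflat, pvPop_cons, pvPop_cons, h1]
      simp [hne, pvSpaced]
    rw [h2, pv_join_spaced]

-- every block after the title is a nonempty string
theorem pv_blocks_ne_empty (summary pfx : String) (bullets : List String) (hp : pfx ≠ "") :
    ∀ x ∈ (if summary ≠ "" then [summary] else []) ++ bullets.map (fun b => pfx ++ b), x ≠ "" := by
  intro x hx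
  rcases List.mem_append.mp hx with hx | hx
  · split at hx
    · rename_i hs; simpa [List.mem_singleton.mp hx] using hs
    · simp at hx
  · rcases List.mem_map.mp hx with ⟨b, _, rfl⟩
    intro hcontra
    apply hp
    have h1 : pfx.toList ++ b.toList = [] := by
      simpa [String.toList_append] using congrArg String.toList hcontra
    have h2 : pfx.toList = [] := (List.append_eq_nil_iff.mp h1).1
    exact String.toList_inj.mp (by simp [h2])

-- the non-markdown foldl appends exactly "block, sentinel" pairs
theorem pv_foldl_pairs (bullets : List String) (pfx : String) (acc : List String) :
    bullets.foldl (fun ps b => ps ++ [pfx ++ b] ++ [""]) acc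
      = acc ++ bullets.flatMap (fun b => [pfx ++ b, ""]) := by
  simpa using PySem.List.foldl_append_eq_flatMap (fun b => [pfx ++ b, ""]) bullets acc

-- B in join normal form: alt = join over the block list
theorem pv_alt_eq_join (title summary : String) (bullets : List String) (markdown : Bool) :
    build_post_content_alt title summary bullets markdown
      = (let pfx : String := if markdown then "- " else "• "
         let blocks := (if summary ≠ "" then [summary] else []) ++ bullets.map (fun b => pfx ++ b)
         if markdown then PySem.Str.join "\n" blocks
         else PySem.Str.join "\n\n" ([title] ++ blocks)) := by
  cases markdown with
  | true =>
    by_cases hs : summary = ""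
    · subst hs
      simp only [build_post_content_alt, ne_eq, not_true_eq_false, reduceIte, Bool.not_true,
        Bool.false_eq_true]
      cases bullets with
      | nil => rfl
      | cons b bs =>
        rw [List.foldl_cons, show pvEmit "\n" (([] : List String), true) ("- " ++ b)
              = ([("- " ++ b)], false) by simp [pvEmit], pv_foldl_emit]
        simpa [List.flatMap_map] using pv_chunks_join "\n" ("- " ++ b) (bs.map (fun b => "- " ++ b))
    · simp only [build_post_content_alt, ne_eq, hs, not_false_eq_true, reduceIte, Bool.not_true,
        Bool.false_eq_true]
      rw [show pvEmit "\n" (([] : List String), true) summary = ([summary], false) by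
        simp [pvEmit], pv_foldl_emit]
      simpa [hs, List.flatMap_map] using pv_chunks_join "\n" summary (bullets.map (fun b => "- " ++ b))
  | false =>
    by_cases hs : summary = ""
    · subst hs
      simp only [build_post_content_alt, ne_eq, not_true_eq_false, reduceIte, Bool.not_false,
        Bool.false_eq_true]
      rw [show pvEmit "\n\n" (([] : List String), true) title = ([title], false) by
        simp [pvEmit], pv_foldl_emit]
      simpa [List.flatMap_map] using pv_chunks_join "\n\n" title (bullets.map (fun b => "• " ++ b))
    · simp only [build_post_content_alt, ne_eq, hs, not_false_eq_true, reduceIte, Bool.not_false,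
        Bool.false_eq_true]
      rw [show pvEmit "\n\n" (([] : List String), true) title = ([title], false) by
        simp [pvEmit],
        show pvEmit "\n\n" (([title] : List String), false) summary
          = ([title, "\n\n", summary], false) by simp [pvEmit], pv_foldl_emit]
      have hstream : ([title, "\n\n", summary] : List String)
            ++ bullets.flatMap (fun b => ["\n\n", "• " ++ b])
          = [title] ++ (summary :: bullets.map (fun b => "• " ++ b)).flatMap
              (fun y => ["\n\n", y]) := by
        simp [List.flatMap_cons, List.flatMap_map]
      rw [hstream]
      simpa [hs, List.flatMap_map] using
        pv_chunks_join "\n\n" title (summary :: bullets.map (fun b => "• " ++ b))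

-- ===== VERDICT (by name: the statement is the Claim_ definition above) =====
theorem build_post_content_spec : Claim_equal_build_post_content := by
  intro title summary bullets markdown _
  unfold Spec_build_post_content
  rw [pv_alt_eq_join]
  unfold build_post_content
  cases markdown with
  | true =>
    simp only [reduceIte]
    rw [PySem.List.foldl_append_singleton_eq_map]
    simp
  | false =>
    simp only [Bool.false_eq_true, reduceIte]
    rw [pv_foldl_pairs]
    have hshape :
        (if summary ≠ "" then (([] : List String) ++ [title]) ++ [""] ++ [summary] ++ [""]
          else (([] : List String) ++ [title]) ++ [""])
          ++ bullets.flatMap (fun b => ["• " ++ b, ""])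
        = (title :: ((if summary ≠ "" then [summary] else [])
            ++ bullets.map (fun b => "• " ++ b))).flatMap (fun x => [x, ""]) := by
      by_cases hs : summary = "" <;> simp [hs, List.flatMap_cons, List.flatMap_map]
    rw [hshape]
    simpa using pv_main title _ (pv_blocks_ne_empty summary "• " bullets (by decide))
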